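-- pv_equiv track=rewrite | github.com/pookaPlay/ohm | src/bls/DataIO.py | DeserializeMSBOffset
-- ===== SOURCE A (Python) =====
-- def DeserializeMSBOffset(input):
--     NBits= len(input)
--     offset = 2**(NBits-1)
--
--     thresholds = [2**i for i in range(NBits)]
--     thresholds.reverse()
--
--     result = sum([input[i] * thresholds[i] for i in range(NBits)])
--     result -= offset
--
--     return(result)
-- ===== SOURCE B (Python) =====
-- def DeserializeMSBOffset(input):
--     result = 0
--     for bit in input:
--         result = result * 2 + bit
--     return result - 2 ** (len(input) - 1)
-- ===== Notes on version B (the rewrite author's own statement) =====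
-- stated objective: simpler
-- what changed: Replaces A's precomputed reversed powers-of-two table and index-based product-sum with a single Horner accumulator pass (result = result*2 + bit).
-- outside the precondition, e.g. on DeserializeMSBOffset([]): A returns -0.5, B returns -0.5
import Mathlib
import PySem

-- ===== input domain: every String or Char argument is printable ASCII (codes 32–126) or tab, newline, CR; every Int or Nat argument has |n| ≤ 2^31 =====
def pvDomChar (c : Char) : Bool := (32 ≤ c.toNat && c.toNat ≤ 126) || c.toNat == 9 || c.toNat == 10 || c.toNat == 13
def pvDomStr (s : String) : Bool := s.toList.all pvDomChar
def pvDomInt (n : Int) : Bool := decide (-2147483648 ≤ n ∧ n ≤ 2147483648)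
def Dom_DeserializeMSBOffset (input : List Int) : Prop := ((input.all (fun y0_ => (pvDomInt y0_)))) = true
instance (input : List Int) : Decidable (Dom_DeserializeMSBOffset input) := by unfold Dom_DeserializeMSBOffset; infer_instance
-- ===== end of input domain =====

-- B replaces A's reversed powers-of-two table and index-based product-sum with a single
-- Horner accumulator pass (simpler, no auxiliary list); same return value on all non-empty inputs.


-- ===== PORT A =====
def DeserializeMSBOffset (input : List Int) : Int :=
  let NBits := input.length
  let offset : Int := 2 ^ (NBits - 1)
  let thresholds := ((List.range NBits).map (fun i => (2 : Int) ^ i)).reverse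
  let result := ((List.range NBits).map (fun i => input.getD i 0 * thresholds.getD i 0)).sum
  result - offset

-- ===== PORT B =====
def DeserializeMSBOffset_alt (input : List Int) : Int :=
  (input.foldl (fun r b => r * 2 + b) 0) - 2 ^ (input.length - 1)

-- ===== PRECONDITION & SPEC =====
-- Pre_ excludes only the empty list: there Python computes 2**(-1) = 0.5 and A (and B alike)
-- returns the float -0.5, which is not a value of the declared Int result type.
def Pre_DeserializeMSBOffset (input : List Int) : Prop := input ≠ []
instance (input : List Int) : Decidable (Pre_DeserializeMSBOffset input) := by unfold Pre_DeserializeMSBOffset; infer_instance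
def pvWitness_DeserializeMSBOffset : List Int := [1, 0, 1]
def Spec_DeserializeMSBOffset (input : List Int) (out : Int) : Prop := out = DeserializeMSBOffset_alt input
instance (input : List Int) (out : Int) : Decidable (Spec_DeserializeMSBOffset input out) := by unfold Spec_DeserializeMSBOffset; infer_instance

-- ===== CLAIM (what is proved, stated in full; the proofs are below) =====
def Claim_equal_DeserializeMSBOffset : Prop := ∀ (input : List Int), Dom_DeserializeMSBOffset input → Pre_DeserializeMSBOffset input → Spec_DeserializeMSBOffset input (DeserializeMSBOffset input)

-- ===== LEMMAS AND PROOFS =====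

-- the reversed thresholds table at index i is 2^(n-1-i)
lemma thr_getD (n i : ℕ) (h : i < n) :
    (((List.range n).map (fun j => (2 : Int) ^ j)).reverse).getD i 0 = 2 ^ (n - 1 - i) := by
  have hlen : (((List.range n).map (fun j => (2 : Int) ^ j)).reverse).length = n := by simp
  rw [List.getD_eq_getElem _ _ (by omega : i < (((List.range n).map (fun j => (2 : Int) ^ j)).reverse).length)]
  rw [List.getElem_reverse]
  simp

-- A's product-sum, as a function of the list
def pvS (xs : List Int) : Int :=
  ((List.range xs.length).map
    (fun i => xs.getD i 0 * (((List.range xs.length).map (fun j => (2 : Int) ^ j)).reverse).getD i 0)).sum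

lemma pvS_append (ys : List Int) (b : Int) : pvS (ys ++ [b]) = 2 * pvS ys + b := by
  unfold pvS
  have hlen : (ys ++ [b]).length = ys.length + 1 := by simp
  rw [hlen, List.range_succ, List.map_append, List.sum_append]
  simp only [List.map_cons, List.map_nil, List.sum_cons, List.sum_nil]
  have h1 : (ys ++ [b]).getD ys.length 0 = b := by
    rw [List.getD_eq_getElem _ _ (by simp)]
    simp
  have h2 : (((List.range (ys.length + 1)).map (fun j => (2 : Int) ^ j)).reverse).getD ys.length 0 = 1 := by
    rw [thr_getD _ _ (by omega)]
    simp
  simp only [← List.range_succ]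
  rw [h1, h2]
  have h3 : (List.range ys.length).map
      (fun i => (ys ++ [b]).getD i 0 * (((List.range (ys.length + 1)).map (fun j => (2 : Int) ^ j)).reverse).getD i 0)
      = (List.range ys.length).map
      (fun i => 2 * (ys.getD i 0 * (((List.range ys.length).map (fun j => (2 : Int) ^ j)).reverse).getD i 0)) := by
    apply List.map_congr_left
    intro i hi
    rw [List.mem_range] at hi
    rw [thr_getD _ _ (by omega), thr_getD _ _ hi]
    rw [List.getD_append _ _ _ _ hi]
    have : ys.length + 1 - 1 - i = (ys.length - 1 - i) + 1 := by omega
    rw [this, pow_succ]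
    ring
  rw [h3, List.sum_map_mul_left]
  ring

lemma pvS_horner (xs : List Int) : pvS xs = xs.foldl (fun r b => r * 2 + b) 0 := by
  induction xs using List.reverseRecOn with
  | nil => simp [pvS]
  | append_singleton ys b ih =>
    rw [pvS_append, ih, List.foldl_append]
    simp only [List.foldl_cons, List.foldl_nil]
    ring

-- ===== VERDICT (by name: the statement is the Claim_ definition above) =====
theorem DeserializeMSBOffset_spec : Claim_equal_DeserializeMSBOffset := by
  intro input _ _
  unfold Spec_DeserializeMSBOffset DeserializeMSBOffset DeserializeMSBOffset_alt
  simp only []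
  have := pvS_horner input
  unfold pvS at this
  omega
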